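-- pv_equiv track=rewrite | github.com/Shne/Thesis | Scripts/formatNaiveVsPreallocatedFroGnuplot.py | getNumberOfEqualSkews
-- ===== SOURCE A (Python) =====
-- def getNumberOfEqualSkews(skewList):
-- 	stepsize = 0
-- 	for skew in skewList:
-- 		if(skew == 2):
-- 			stepsize += 1
--
-- 		if(skew > 2):
-- 			break
-- 	return stepsize
-- ===== SOURCE B (Python) =====
-- def getNumberOfEqualSkews(skewList):
-- 	count = 0
-- 	for skew in reversed(skewList):
-- 		if skew > 2:
-- 			count = 0
-- 		elif skew == 2:
-- 			count += 1
-- 	return count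
-- ===== Notes on version B (the rewrite author's own statement) =====
-- stated objective: alternative
-- what changed: Replaces the forward loop that breaks at the first element > 2 by a full backward pass with a reset accumulator: scanning right-to-left, an element > 2 resets the count to 0 and a 2 increments it, so the final count is the number of 2s before the first element > 2.
import Mathlib
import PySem

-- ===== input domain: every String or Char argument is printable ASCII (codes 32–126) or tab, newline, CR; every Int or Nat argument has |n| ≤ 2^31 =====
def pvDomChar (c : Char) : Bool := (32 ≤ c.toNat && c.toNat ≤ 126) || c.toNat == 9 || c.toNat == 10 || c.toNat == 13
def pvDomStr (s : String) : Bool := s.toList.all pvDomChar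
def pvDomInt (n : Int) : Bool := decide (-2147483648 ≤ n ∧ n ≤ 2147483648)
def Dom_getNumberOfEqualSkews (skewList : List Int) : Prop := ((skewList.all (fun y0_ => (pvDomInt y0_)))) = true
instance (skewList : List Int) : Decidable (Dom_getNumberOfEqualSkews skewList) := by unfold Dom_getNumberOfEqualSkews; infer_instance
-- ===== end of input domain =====

-- B replaces A's forward loop-with-break by a full backward pass with a reset accumulator (alternative traversal).

-- ===== PORT A =====
-- A's for-loop with break, as structural recursion carrying the accumulator `stepsize`.
def getNumberOfEqualSkewsLoop (stepsize : Int) : List Int → Int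
  | [] => stepsize
  | skew :: rest =>
    let stepsize := if skew == 2 then stepsize + 1 else stepsize
    if skew > 2 then stepsize else getNumberOfEqualSkewsLoop stepsize rest

def getNumberOfEqualSkews (skewList : List Int) : Int :=
  getNumberOfEqualSkewsLoop 0 skewList

-- ===== PORT B =====
-- loop over reversed(skewList): an element > 2 resets the count, a 2 increments it.
def getNumberOfEqualSkews_alt (skewList : List Int) : Int :=
  skewList.reverse.foldl
    (fun count skew => if skew > 2 then 0 else if skew == 2 then count + 1 else count) 0

-- ===== PRECONDITION & SPEC =====
def Spec_getNumberOfEqualSkews (skewList : List Int) (out : Int) : Prop := out = getNumberOfEqualSkews_alt skewList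
instance (skewList : List Int) (out : Int) : Decidable (Spec_getNumberOfEqualSkews skewList out) := by unfold Spec_getNumberOfEqualSkews; infer_instance

-- ===== CLAIM =====
def Claim_equal_getNumberOfEqualSkews : Prop := ∀ (skewList : List Int), Dom_getNumberOfEqualSkews skewList → Spec_getNumberOfEqualSkews skewList (getNumberOfEqualSkews skewList)

-- ===== LEMMAS AND PROOFS =====
theorem alt_cons (x : Int) (xs : List Int) :
    getNumberOfEqualSkews_alt (x :: xs) =
      if x > 2 then 0
      else if x == 2 then getNumberOfEqualSkews_alt xs + 1
      else getNumberOfEqualSkews_alt xs := by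
  unfold getNumberOfEqualSkews_alt
  rw [List.foldl_reverse, List.foldl_reverse]
  simp [List.foldr]

theorem getNumberOfEqualSkewsLoop_eq (acc : Int) (xs : List Int) :
    getNumberOfEqualSkewsLoop acc xs = acc + getNumberOfEqualSkews_alt xs := by
  induction xs generalizing acc with
  | nil => simp [getNumberOfEqualSkewsLoop, getNumberOfEqualSkews_alt]
  | cons x rest ih =>
    rw [alt_cons]
    unfold getNumberOfEqualSkewsLoop
    by_cases hgt : x > 2
    · have hne : (x == 2) = false := by simp; omega
      simp [hgt, hne]
    · simp only [if_neg hgt]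
      rw [ih]
      by_cases heq : x = 2
      · subst heq; simp; ring
      · have hne : (x == 2) = false := by simp [heq]
        simp [hne]

-- ===== VERDICT =====
theorem getNumberOfEqualSkews_spec : Claim_equal_getNumberOfEqualSkews := by
  intro xs _
  unfold Spec_getNumberOfEqualSkews getNumberOfEqualSkews
  rw [getNumberOfEqualSkewsLoop_eq]
  ring
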